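-- pv_equiv track=rewrite | github.com/matplo/lblpmp | inspireq.py | sorted_arxiv
-- ===== SOURCE A (Python) =====
-- def sorted_arxiv(records):
--     _old = []
--     _new = []
--     for a in records:
--         if "/" in a.split()[0]:
--             _old.append(a)
--         else:
--             _new.append(a)
--     out = []
--     _new = sorted(_new, reverse=True)
--     _old = sorted(_old, reverse=True)
--     for a in _new:
--         out.append(a)
--     for a in _old:
--         out.append(a)
--     return out
-- ===== SOURCE B (Python) =====
-- def sorted_arxiv(records):
--     # Single stable sort with a composite key: new-style records (no '/' in the
--     # first token) compare greater than old-style ones, ties broken by the full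
--     # string; reverse=True puts new first, each group descending.
--     return sorted(records, key=lambda a: ("/" not in a.split()[0], a), reverse=True)
-- ===== Notes on version B (the rewrite author's own statement) =====
-- stated objective: simpler
-- what changed: B replaces A's partition-into-two-lists plus two separate sorts plus concatenation with a single stable sort under a composite key (is-new flag, whole string) with reverse=True; no partition or concatenation remains.
import Mathlib
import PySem

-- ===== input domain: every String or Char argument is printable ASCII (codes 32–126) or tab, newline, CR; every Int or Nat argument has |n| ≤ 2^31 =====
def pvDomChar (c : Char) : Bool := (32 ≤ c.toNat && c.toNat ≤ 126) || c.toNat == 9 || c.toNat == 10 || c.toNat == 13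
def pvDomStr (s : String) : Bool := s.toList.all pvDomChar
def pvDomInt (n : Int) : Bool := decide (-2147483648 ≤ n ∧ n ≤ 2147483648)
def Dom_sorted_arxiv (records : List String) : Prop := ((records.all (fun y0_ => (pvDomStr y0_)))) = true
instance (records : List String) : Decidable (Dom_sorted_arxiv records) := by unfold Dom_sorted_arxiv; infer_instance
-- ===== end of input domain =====

-- B replaces A's partition + two sorts + concatenation by ONE stable sort under a
-- composite key (is-new flag, whole string) with reverse=True; same asymptotic cost.

-- shared predicate: '"/" in a.split()[0]'  (Python raises IndexError when a.split() is empty;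
-- those inputs are excluded by Pre_; the .getD "" default is never reached inside Pre_)
def pvIsOld (a : String) : Bool := PySem.Str.isIn "/" ((PySem.List.pyGet? (PySem.Str.split₀ a) 0).getD "")

-- ===== PORT A =====
def sorted_arxiv (records : List String) : List String :=
  let st := records.foldl
    (fun (st : List String × List String) a =>
      if pvIsOld a then (st.1 ++ [a], st.2) else (st.1, st.2 ++ [a])) ([], [])
  let nw := PySem.List.sorted st.2 (fun x => x) true
  let od := PySem.List.sorted st.1 (fun x => x) true
  let out1 := nw.foldl (fun out a => out ++ [a]) []
  od.foldl (fun out a => out ++ [a]) out1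

-- ===== PORT B =====
-- 'sorted(records, key=lambda a: ("/" not in a.split()[0], a), reverse=True)'
def sorted_arxiv_alt (records : List String) : List String :=
  PySem.List.sorted2 records (fun a => !pvIsOld a) (fun a => a) true

-- ===== PRECONDITION & SPEC =====
-- Pre_ excludes exactly the records whose .split() is empty (all-whitespace strings), on which
-- Python A (and B) raises IndexError at a.split()[0].
def Pre_sorted_arxiv (records : List String) : Prop :=
  (records.all (fun a => !(PySem.Str.split₀ a).isEmpty)) = true
instance (records : List String) : Decidable (Pre_sorted_arxiv records) := by
  unfold Pre_sorted_arxiv; infer_instance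

def pvWitness_sorted_arxiv : List String := ["hep-ph/9901234 old", "1901.01234 new"]

def Spec_sorted_arxiv (records : List String) (out : List String) : Prop := out = sorted_arxiv_alt records
instance (records : List String) (out : List String) : Decidable (Spec_sorted_arxiv records out) := by unfold Spec_sorted_arxiv; infer_instance

-- ===== CLAIM (what is proved, stated in full; the proofs are below) =====
def Claim_equal_sorted_arxiv : Prop := ∀ (records : List String), Dom_sorted_arxiv records → Pre_sorted_arxiv records → Spec_sorted_arxiv records (sorted_arxiv records)

-- ===== LEMMAS AND PROOFS =====

-- the weak "may come before" order of B's reverse composite-key sort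
def pvR (a b : String) : Prop :=
  (pvIsOld b = true ∧ pvIsOld a = false) ∨ (pvIsOld a = pvIsOld b ∧ b ≤ a)

theorem pvR_trans : Transitive pvR := by
  intro a b c hab hbc
  unfold pvR at *
  rcases hab with ⟨h1, h2⟩ | ⟨e1, l1⟩
  · rcases hbc with ⟨h3, h4⟩ | ⟨e2, l2⟩
    · simp_all
    · exact Or.inl ⟨by rw [← e2]; exact h1, h2⟩
  · rcases hbc with ⟨h3, h4⟩ | ⟨e2, l2⟩
    · exact Or.inl ⟨h3, by rw [e1]; exact h4⟩
    · exact Or.inr ⟨e1.trans e2, le_trans l2 l1⟩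

theorem pvR_antisymm (a b : String) (h1 : pvR a b) (h2 : pvR b a) : a = b := by
  unfold pvR at *
  rcases h1 with ⟨x1, x2⟩ | ⟨e1, l1⟩ <;> rcases h2 with ⟨y1, y2⟩ | ⟨e2, l2⟩
  · simp_all
  · simp_all
  · simp_all
  · exact le_antisymm l2 l1

-- B's comparator implies pvR in both polarities
theorem pvBefore_true {a b : String}
    (h : ((decide ((!pvIsOld b) < (!pvIsOld a)) ||
          (!decide ((!pvIsOld a) < (!pvIsOld b)) && decide (b < a))) = true)) : pvR a b := by
  unfold pvR
  cases hA : pvIsOld a <;> cases hB : pvIsOld b <;> simp [hA, hB] at h ⊢ <;>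
    first | exact le_of_lt h | exact absurd h (by decide)

theorem pvBefore_false {a b : String}
    (h : ((decide ((!pvIsOld b) < (!pvIsOld a)) ||
          (!decide ((!pvIsOld a) < (!pvIsOld b)) && decide (b < a))) = false)) : pvR b a := by
  unfold pvR
  cases hA : pvIsOld a <;> cases hB : pvIsOld b <;> simp [hA, hB] at h ⊢ <;> exact h

-- insertBy with a comparator compatible with pvR preserves Pairwise pvR
theorem pairwise_insertBy (before : String → String → Bool)
    (hbt : ∀ a b, before a b = true → pvR a b)
    (hbf : ∀ a b, before a b = false → pvR b a)
    (x : String) (ys : List String) (h : ys.Pairwise pvR) :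
    (PySem.List.insertBy before x ys).Pairwise pvR := by
  induction ys with
  | nil => simp [PySem.List.insertBy]
  | cons y ys ih =>
    rcases List.pairwise_cons.mp h with ⟨hy, hys⟩
    by_cases hb : before x y = true
    · simp only [PySem.List.insertBy, hb, if_true]
      refine List.pairwise_cons.mpr ⟨?_, h⟩
      intro z hz
      rcases List.mem_cons.mp hz with rfl | hz
      · exact hbt _ _ hb
      · exact pvR_trans (hbt _ _ hb) (hy z hz)
    · have hb' : before x y = false := Bool.not_eq_true _ |>.mp hb
      simp only [PySem.List.insertBy, hb', Bool.false_eq_true, if_false]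
      refine List.pairwise_cons.mpr ⟨?_, ih hys⟩
      intro z hz
      rcases (PySem.List.mem_insertBy _ _ _ _).mp hz with rfl | hz
      · exact hbf _ _ hb'
      · exact hy z hz

theorem pairwise_foldl_insertBy (before : String → String → Bool)
    (hbt : ∀ a b, before a b = true → pvR a b)
    (hbf : ∀ a b, before a b = false → pvR b a)
    (xs acc : List String) (h : acc.Pairwise pvR) :
    (xs.foldl (fun acc x => PySem.List.insertBy before x acc) acc).Pairwise pvR := by
  induction xs generalizing acc with
  | nil => exact h
  | cons x xs ih => exact ih _ (pairwise_insertBy before hbt hbf x acc h)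

theorem pairwise_alt (records : List String) :
    (sorted_arxiv_alt records).Pairwise pvR := by
  unfold sorted_arxiv_alt PySem.List.sorted2
  exact pairwise_foldl_insertBy _ (fun a b => pvBefore_true) (fun a b => pvBefore_false)
    records [] List.Pairwise.nil

-- A's partition loop computes (filter pvIsOld, filter (!pvIsOld))
theorem pvPartition_eq (l : List String) (o n : List String) :
    l.foldl (fun (st : List String × List String) a =>
      if pvIsOld a then (st.1 ++ [a], st.2) else (st.1, st.2 ++ [a])) (o, n)
    = (o ++ l.filter (fun a => pvIsOld a), n ++ l.filter (fun a => !pvIsOld a)) := by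
  induction l generalizing o n with
  | nil => simp
  | cons a t ih =>
    by_cases h : pvIsOld a = true <;> simp [List.foldl, h, ih, List.filter]

theorem pvAppendLoop (l acc : List String) :
    l.foldl (fun out a => out ++ [a]) acc = acc ++ l := by
  induction l generalizing acc with
  | nil => simp
  | cons a t ih => simp [List.foldl, ih]

-- A's concatenation (new-group sorted desc ++ old-group sorted desc) is Pairwise pvR
theorem pairwise_a (records : List String) :
    ((PySem.List.sorted (records.filter (fun a => !pvIsOld a)) (fun x => x) true) ++
     (PySem.List.sorted (records.filter (fun a => pvIsOld a)) (fun x => x) true)).Pairwise pvR := by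
  have hnw := PySem.List.sorted_pairwise_rev (records.filter (fun a => !pvIsOld a)) (fun x => x)
  have hod := PySem.List.sorted_pairwise_rev (records.filter (fun a => pvIsOld a)) (fun x => x)
  refine List.pairwise_append.mpr ⟨?_, ?_, ?_⟩
  · refine hnw.imp_of_mem ?_
    intro a b ha hb hle
    have ha' := List.of_mem_filter ((PySem.List.mem_sorted _ _ _ _).mp ha)
    have hb' := List.of_mem_filter ((PySem.List.mem_sorted _ _ _ _).mp hb)
    have ha'' : pvIsOld a = false := by simpa using ha'
    have hb'' : pvIsOld b = false := by simpa using hb'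
    exact Or.inr ⟨ha''.trans hb''.symm, hle⟩
  · refine hod.imp_of_mem ?_
    intro a b ha hb hle
    have ha' := List.of_mem_filter ((PySem.List.mem_sorted _ _ _ _).mp ha)
    have hb' := List.of_mem_filter ((PySem.List.mem_sorted _ _ _ _).mp hb)
    have ha'' : pvIsOld a = true := by simpa using ha'
    have hb'' : pvIsOld b = true := by simpa using hb'
    exact Or.inr ⟨ha''.trans hb''.symm, hle⟩
  · intro a ha b hb
    have ha' := List.of_mem_filter ((PySem.List.mem_sorted _ _ _ _).mp ha)
    have hb' := List.of_mem_filter ((PySem.List.mem_sorted _ _ _ _).mp hb)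
    have ha'' : pvIsOld a = false := by simpa using ha'
    have hb'' : pvIsOld b = true := by simpa using hb'
    exact Or.inl ⟨hb'', ha''⟩

-- A's concatenation is a permutation of records
theorem perm_a (records : List String) :
    ((PySem.List.sorted (records.filter (fun a => !pvIsOld a)) (fun x => x) true) ++
     (PySem.List.sorted (records.filter (fun a => pvIsOld a)) (fun x => x) true)).Perm records := by
  have h1 := PySem.List.sorted_perm (records.filter (fun a => !pvIsOld a)) (fun x : String => x) true
  have h2 := PySem.List.sorted_perm (records.filter (fun a => pvIsOld a)) (fun x : String => x) true
  refine (h1.append h2).trans ?_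
  simpa using List.filter_append_perm (fun a => !pvIsOld a) records

-- ===== VERDICT (by name: the statement is the Claim_ definition above) =====
theorem sorted_arxiv_spec : Claim_equal_sorted_arxiv := by
  intro records _ _
  unfold Spec_sorted_arxiv
  have hA : sorted_arxiv records =
      (PySem.List.sorted (records.filter (fun a => !pvIsOld a)) (fun x => x) true) ++
      (PySem.List.sorted (records.filter (fun a => pvIsOld a)) (fun x => x) true) := by
    unfold sorted_arxiv
    simp only [pvPartition_eq records [] [], List.nil_append, pvAppendLoop]
  rw [hA]
  have hperm : ((PySem.List.sorted (records.filter (fun a => !pvIsOld a)) (fun x => x) true) ++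
      (PySem.List.sorted (records.filter (fun a => pvIsOld a)) (fun x => x) true)).Perm
      (sorted_arxiv_alt records) :=
    (perm_a records).trans (PySem.List.sorted2_perm records _ _ true).symm
  exact List.Perm.eq_of_pairwise (fun a b _ _ h1 h2 => pvR_antisymm a b h1 h2)
    (pairwise_a records) (pairwise_alt records) hperm
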